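-- pv_equiv track=rewrite | github.com/awslabs/graphstorm | examples/temporal_graph_learning/model_utils.py | get_temporal_ordered_etypes
-- ===== SOURCE A (Python) =====
-- def rel_name_map(rel_name):
--     """
--     Remove the number suffix from relation name.
--
--         {rel_name}_{i}-rev --> {rel_name}-rev
--         {rel_name}_{i} --> {rel_name}
--
--     Parameters
--     ----------
--     rel_name: string
--         relation name with number suffix
--
--     Returns
--     -------
--         string: relation name without number suffix
--     """
--     if "-rev" in rel_name:
--         return (
--             rel_name.split("-")[0].rstrip("_0123456789") + "-rev"
--         )
--     return rel_name.rstrip("_0123456789")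
--
-- def get_unique_etype_triplet(etype_triplet):
--     """
--     Given a list of etype triplet (src, relation_name, dst), remove the number suffix from each relation name.
--     This function calls `rel_name_map` on the relation name of each etype triplet in the list.
--
--     Parameters
--     ----------
--     etype_triplet: list of triplet
--         list of etype triplet (src, relation_name, dst) with number suffix
--
--     Returns
--     -------
--         list of triplet: list of etype triplet (src, relation_name, dst) without number suffix
--     """
--     # remove the timestamp from relation name, then form as triplet (src, rel, dst)
--     etype_triplet = [(src, rel_name_map(rel), dst) for src, rel, dst in etype_triplet]
--     etype_triplet = list(set(etype_triplet))
--     etype_triplet.sort()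
--     return etype_triplet
--
-- def get_temporal_ordered_etypes(etypes):
--     """
--     This function is used to construct the DGLBlock for temporal aggregation,
--     which is later used with `merge_multi_blocks` to construct a new DGLBlock for temporal aggregation.
--
--     Parameters
--     ----------
--     inputs: list of etypes. For example,
--         inputs = [
--             ('paper', 'cite_04', 'paper'),
--             ('paper', 'cite_05', 'paper'),
--             ('paper', 'cite_06', 'paper')
--         ]
--
--     Returns
--     -------
--         dict that map each etype to a list of etypes. For example,
--             outputs = {
--                 ('paper', 'cite_04', 'paper'): [
--                     ('paper', 'cite_04', 'paper')
--                 ],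
--                 ('paper', 'cite_05', 'paper'): [
--                     ('paper', 'cite_04', 'paper'),
--                     ('paper', 'cite_05', 'paper')
--                 ],
--                 ('paper', 'cite_06', 'paper'): [
--                     ('paper', 'cite_04', 'paper'),
--                     ('paper', 'cite_05', 'paper'),
--                     ('paper', 'cite_06', 'paper')
--                 ]
--             }
--
--     """
--     etype_group = {
--         etype: [] for etype in get_unique_etype_triplet(etypes)
--     }
--
--     for src, rel, dst in etypes:
--         etype = (src, rel_name_map(rel), dst)
--         etype_group[etype].append((src, rel, dst))
--
--     mapping = {}
--     for k, v in etype_group.items():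
--         v.sort()
--         v = [v[:i] for i in range(1, len(v) + 1)]
--
--         for etype_list in v:
--             mapping[etype_list[-1]] = etype_list
--     return mapping
-- ===== SOURCE B (Python) =====
-- def rel_name_map(rel_name):
--     if "-rev" in rel_name:
--         return rel_name.split("-")[0].rstrip("_0123456789") + "-rev"
--     return rel_name.rstrip("_0123456789")
--
-- def get_temporal_ordered_etypes(etypes):
--     # Closed-form characterization: no grouping dict and no prefix building.
--     # Each distinct etype e maps directly to the sorted list of all input
--     # etypes sharing e's normalized triplet that compare <= e; keys appear
--     # sorted by (normalized triplet, etype).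
--     def norm(t):
--         return (t[0], rel_name_map(t[1]), t[2])
--     items = [(src, rel, dst) for src, rel, dst in etypes]
--     return {
--         e: sorted(x for x in items if norm(x) == norm(e) and x <= e)
--         for e in sorted(set(items), key=lambda t: (norm(t), t))
--     }
-- ===== Notes on version B (the rewrite author's own statement) =====
-- stated objective: alternative
-- what changed: Replaces A's staged pipeline (normalize/dedup/sort pass, pre-seeded grouping dict, per-group sort, and mapping each element to its growing prefix slice v[:i]) with a direct closed-form characterization: each distinct etype e maps to sorted(x in etypes with the same normalized triplet and x <= e), keys taken from sorted(set(etypes), key=(normalized triplet, etype)); no grouping dict and no prefix lists are ever built.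
import Mathlib
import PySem

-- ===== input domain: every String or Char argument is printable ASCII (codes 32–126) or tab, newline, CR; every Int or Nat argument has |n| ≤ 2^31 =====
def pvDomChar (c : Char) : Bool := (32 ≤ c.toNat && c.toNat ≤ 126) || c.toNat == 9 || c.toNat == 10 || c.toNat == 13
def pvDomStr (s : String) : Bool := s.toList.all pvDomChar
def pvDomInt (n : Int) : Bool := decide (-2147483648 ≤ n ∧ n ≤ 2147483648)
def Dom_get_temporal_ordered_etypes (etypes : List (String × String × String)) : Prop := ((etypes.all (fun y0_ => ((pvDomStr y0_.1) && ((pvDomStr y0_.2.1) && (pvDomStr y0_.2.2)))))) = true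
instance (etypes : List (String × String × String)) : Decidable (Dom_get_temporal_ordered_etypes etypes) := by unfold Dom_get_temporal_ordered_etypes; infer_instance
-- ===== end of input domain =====

-- B replaces A's staged pipeline (normalize/dedup/sort pass, pre-seeded grouping dict, per-group
-- sort and growing prefix slices v[:i]) by a direct closed form: each distinct etype e maps to
-- sorted(x in etypes with the same normalized triplet and x <= e) (objective: alternative).

abbrev PvT : Type := String × String × String
abbrev PvK : Type := Lex (String × Lex (String × String))

-- exact port of s.rstrip("_0123456789"): drop trailing characters of that set
def pvRstripNum (s : String) : String :=
  String.ofList ((s.toList.reverse.dropWhile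
    (fun c => c ∈ ['_', '0', '1', '2', '3', '4', '5', '6', '7', '8', '9'])).reverse)

-- port of rel_name_map (shared helper of both Pythons)
def relNameMap (rel : String) : String :=
  if PySem.Str.isIn "-rev" rel then
    -- rel.split("-")[0]: separator "-" ≠ "" so split? = some, and a split is never
    -- empty, so index 0 exists; the two defaults are unreachable
    pvRstripNum ((PySem.List.pyGet? ((PySem.Str.split? rel "-").getD []) 0).getD "") ++ "-rev"
  else
    pvRstripNum rel

-- (src, rel_name_map(rel), dst)
def pvNorm (e : PvT) : PvT := (e.1, relNameMap e.2.1, e.2.2)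

-- Python tuple comparison = lexicographic; strings compare as Lean String '<'
def pvKey (t : PvT) : PvK := toLex (t.1, toLex (t.2.1, t.2.2))

-- B's sort key lambda t: (norm(t), t) — a Python pair of tuples, again lexicographic
def pvKey2 (t : PvT) : Lex (PvK × PvK) := toLex (pvKey (pvNorm t), pvKey t)

-- ===== PORT A =====
def get_unique_etype_triplet (etype_triplet : List PvT) : List PvT :=
  let l1 := etype_triplet.map pvNorm
  let l2 := PySem.Set.ofList l1            -- list(set(...))
  PySem.List.sorted l2 pvKey               -- .sort() (no key: whole-tuple comparison)

def get_temporal_ordered_etypes (etypes : List (String × String × String)) : List (String × String × String × List (String × String × String)) :=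
  -- etype_group = {etype: [] for etype in get_unique_etype_triplet(etypes)}
  let g0 : PySem.Dict PvT (List PvT) :=
    (get_unique_etype_triplet etypes).foldl (fun d k => d.insert k []) PySem.Dict.empty
  -- etype_group[etype].append((src, rel, dst)): every etype is seeded above, so the
  -- lookup never raises and modify with default [] computes the same append
  let g := etypes.foldl (fun d e => d.modify (pvNorm e) [] (fun v => v ++ [e])) g0
  let mapping := g.items.foldl (fun m kv =>
      let v := PySem.List.sorted kv.2 pvKey                              -- v.sort()
      let ps := (PySem.List.pyRange 1 ((v.length : Int) + 1)).map
        (fun i => PySem.List.slice v none (some i))                      -- [v[:i] ...]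
      -- etype_list[-1]: each etype_list is v[:i] with i ≥ 1, nonempty, so the
      -- default is unreachable
      ps.foldl (fun m p => m.insert ((PySem.List.pyGet? p (-1)).getD ("", "", "")) p) m)
    (PySem.Dict.empty : PySem.Dict PvT (List PvT))
  -- dict with tuple keys, flattened per the type convention
  mapping.items.map (fun kv => (kv.1.1, kv.1.2.1, kv.1.2.2, kv.2))

-- ===== PORT B =====
def get_temporal_ordered_etypes_alt (etypes : List (String × String × String)) : List (String × String × String × List (String × String × String)) :=
  -- sorted(set(etypes), key=lambda t: (norm(t), t))
  let keys := PySem.List.sorted (PySem.Set.ofList etypes) pvKey2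
  -- {e: sorted(x for x in etypes if norm(x) == norm(e) and x <= e) for e in keys}
  let mapping := keys.foldl (fun m e =>
      m.insert e (PySem.List.sorted
        (etypes.filter (fun x => pvNorm x == pvNorm e && decide (pvKey x ≤ pvKey e))) pvKey))
    (PySem.Dict.empty : PySem.Dict PvT (List PvT))
  -- dict with tuple keys, flattened per the type convention
  mapping.items.map (fun kv => (kv.1.1, kv.1.2.1, kv.1.2.2, kv.2))

-- ===== PRECONDITION & SPEC =====
def Spec_get_temporal_ordered_etypes (etypes : List (String × String × String)) (out : List (String × String × String × List (String × String × String))) : Prop := out = get_temporal_ordered_etypes_alt etypes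
instance (etypes : List (String × String × String)) (out : List (String × String × String × List (String × String × String))) : Decidable (Spec_get_temporal_ordered_etypes etypes out) := by
  unfold Spec_get_temporal_ordered_etypes
  -- built stepwise: the nested product exceeds instance-search's default size limit
  letI d3 : DecidableEq (String × String × String) := inferInstance
  letI dl : DecidableEq (List (String × String × String)) := inferInstance
  letI d4 : DecidableEq (String × String × String × List (String × String × String)) :=
    inferInstance
  exact List.hasDecEq _ _

-- ===== CLAIM (what is proved, stated in full; the proofs are below) =====
def Claim_equal_get_temporal_ordered_etypes : Prop := ∀ (etypes : List (String × String × String)), Dom_get_temporal_ordered_etypes etypes → Spec_get_temporal_ordered_etypes etypes (get_temporal_ordered_etypes etypes)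

-- ===== LEMMAS AND PROOFS =====

-- the normalized key list A iterates over group by group
def pvUniq (etypes : List PvT) : List PvT :=
  PySem.List.sorted (PySem.Set.ofList (etypes.map pvNorm)) pvKey

-- the group of c and its sorted form (A's v)
def pvGrp (etypes : List PvT) (c : PvT) : List PvT := etypes.filter (fun e => pvNorm e == c)
def pvW (etypes : List PvT) (c : PvT) : List PvT := PySem.List.sorted (pvGrp etypes c) pvKey

-- A's inner prefix loop in incremental form (state: prefix so far, mapping)
def pvF (w : List PvT) (acc : List PvT) (m : PySem.Dict PvT (List PvT)) :
    PySem.Dict PvT (List PvT) :=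
  (w.foldl (fun (pm : List PvT × PySem.Dict PvT (List PvT)) e =>
      (pm.1 ++ [e], pm.2.insert e (pm.1 ++ [e]))) (acc, m)).2

-- A's whole mapping, reduced to a fold of pvF over pvUniq
def pvAD (etypes : List PvT) : PySem.Dict PvT (List PvT) :=
  (pvUniq etypes).foldl (fun m c => pvF (pvW etypes c) [] m) PySem.Dict.empty

-- B's key list, value function and mapping
def pvKeysB (etypes : List PvT) : List PvT := PySem.List.sorted (PySem.Set.ofList etypes) pvKey2
def pvValB (etypes : List PvT) (e : PvT) : List PvT :=
  PySem.List.sorted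
    (etypes.filter (fun x => pvNorm x == pvNorm e && decide (pvKey x ≤ pvKey e))) pvKey
def pvBD (etypes : List PvT) : PySem.Dict PvT (List PvT) :=
  (pvKeysB etypes).foldl (fun m e => m.insert e (pvValB etypes e)) PySem.Dict.empty

-- the value A's mapping ends with at key e
def pvValA (etypes : List PvT) (e : PvT) : List PvT :=
  (pvW etypes (pvNorm e)).filter (fun x => decide (pvKey x ≤ pvKey e))

theorem pvKey_inj : Function.Injective pvKey := by
  intro a b h
  simp only [pvKey, toLex_inj, Prod.mk.injEq] at h
  obtain ⟨h1, h2, h3⟩ := h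
  exact Prod.ext h1 (Prod.ext h2 h3)

theorem pvKey2_inj : Function.Injective pvKey2 := by
  intro a b h
  simp only [pvKey2, toLex_inj, Prod.mk.injEq] at h
  exact pvKey_inj h.2

theorem pvUniq_def (etypes : List PvT) :
    pvUniq etypes = PySem.List.sorted (PySem.Set.ofList (etypes.map pvNorm)) pvKey := rfl

theorem pvUniq_nodup (etypes : List PvT) : (pvUniq etypes).Nodup :=
  ((PySem.List.sorted_perm _ _ _).symm).nodup (PySem.Set.nodup_ofList _)

theorem pvUniq_mem {etypes : List PvT} {x : PvT} (h : x ∈ etypes.map pvNorm) :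
    x ∈ pvUniq etypes := by
  unfold pvUniq
  rw [PySem.List.mem_sorted, PySem.Set.mem_ofList]
  exact h

theorem pvUniq_pairwise_lt (etypes : List PvT) :
    (pvUniq etypes).Pairwise (fun a b => pvKey a < pvKey b) := by
  have h := ((PySem.List.sorted_pairwise (PySem.Set.ofList (etypes.map pvNorm)) pvKey).and
    (pvUniq_nodup etypes))
  exact h.imp (fun hab => lt_of_le_of_ne hab.1 (fun hk => hab.2 (pvKey_inj hk)))

theorem mem_pvW {etypes : List PvT} {c x : PvT} :
    x ∈ pvW etypes c ↔ x ∈ etypes ∧ pvNorm x = c := by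
  unfold pvW pvGrp
  rw [PySem.List.mem_sorted, List.mem_filter]
  simp [beq_iff_eq]

theorem pvW_pairwise (etypes : List PvT) (c : PvT) :
    (pvW etypes c).Pairwise (fun a b => pvKey a ≤ pvKey b) :=
  PySem.List.sorted_pairwise _ _

-- updating a set with elements it already has changes nothing
theorem pv_update_self (s : PySem.Set PvT) (xs : List PvT) (hs : ∀ x ∈ xs, x ∈ s) :
    PySem.Set.update s xs = s := by
  rw [PySem.Set.update_eq_append_filter]
  have h : ∀ y ∈ PySem.Set.ofList xs, ¬ (!(PySem.Set.contains s y)) = true := by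
    intro y hy
    have hm : y ∈ s := by
      have := hy
      rw [PySem.Set.mem_ofList] at this
      exact hs y this
    simpa using hm
  rw [List.filter_eq_nil_iff.mpr h, List.append_nil]

-- seeding with [] leaves every getD-with-[] at []
theorem pv_getD_seed (l : List PvT) (d : PySem.Dict PvT (List PvT))
    (h : ∀ c, d.getD c ([] : List PvT) = []) (c : PvT) :
    (l.foldl (fun d k => d.insert k []) d).getD c [] = [] := by
  induction l generalizing d with
  | nil => exact h c
  | cons a t ih =>
      simp only [List.foldl_cons]
      refine ih _ (fun c' => ?_)
      rw [PySem.Dict.getD_insert]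
      split <;> simp [h]

-- the grouping loop: each group is an input filter
theorem pv_getD_group (etypes : List PvT) (d : PySem.Dict PvT (List PvT)) (c : PvT) :
    (etypes.foldl (fun d e => d.modify (pvNorm e) [] (fun v => v ++ [e])) d).getD c []
      = d.getD c [] ++ etypes.filter (fun e => pvNorm e == c) := by
  have h := PySem.Dict.getD_foldl_modify_append (etypes.map (fun e => (pvNorm e, e))) d c
  rw [List.foldl_map] at h
  simpa [List.filter_map, Function.comp_def] using h

-- keys of the grouping loop
theorem pv_keys_group (etypes : List PvT) (d : PySem.Dict PvT (List PvT)) :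
    (etypes.foldl (fun d e => d.modify (pvNorm e) [] (fun v => v ++ [e])) d).keys
      = PySem.Set.update d.keys (etypes.map pvNorm) :=
  PySem.Dict.keys_foldl_modify_key etypes pvNorm [] (fun _ e v => v ++ [e]) d

-- last element of a nonempty snoc via Python's [-1]
theorem pv_pyGet_neg_one (acc : List PvT) (e : PvT) :
    (PySem.List.pyGet? (acc ++ [e]) (-1)).getD ("", "", "") = e := by
  simp [PySem.List.pyGet?, PySem.List.pyIdx?]

-- pyRange 1 (n+1) = [1, …, n]
theorem pv_pyRange_one (n : Nat) :
    PySem.List.pyRange 1 ((n : Int) + 1) = (List.range n).map (fun j : Nat => ((j : Int) + 1)) := by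
  induction n with
  | zero => decide
  | succ k ih =>
      have h1 : (1 : Int) ≤ (k : Int) + 1 := by omega
      have h2 : ((k + 1 : Nat) : Int) + 1 = ((k : Int) + 1) + 1 := by push_cast; ring
      rw [h2, PySem.List.pyRange_one_succ_right h1, ih, List.range_succ]
      simp

-- A's slice list is the list of takes
theorem pv_slices (w : List PvT) :
    (PySem.List.pyRange 1 ((w.length : Int) + 1)).map (fun i => PySem.List.slice w none (some i))
      = (List.range w.length).map (fun j : Nat => w.take (j + 1)) := by
  rw [pv_pyRange_one, List.map_map]
  refine List.map_congr_left (fun j hj => ?_)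
  have h0 : (0 : Int) ≤ (j : Int) + 1 := by omega
  have ht : ((j : Int) + 1).toNat = j + 1 := by omega
  simp [PySem.List.slice_to _ h0, ht]

-- A's prefix-insert loop equals the incremental-accumulator loop pvF
theorem pv_inner (w : List PvT) (m : PySem.Dict PvT (List PvT)) (acc : List PvT) :
    ((List.range w.length).map (fun j : Nat => acc ++ w.take (j + 1))).foldl
        (fun m p => m.insert ((PySem.List.pyGet? p (-1)).getD ("", "", "")) p) m
      = (w.foldl (fun (pm : List PvT × PySem.Dict PvT (List PvT)) e =>
          (pm.1 ++ [e], pm.2.insert e (pm.1 ++ [e]))) (acc, m)).2 := by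
  induction w generalizing m acc with
  | nil => simp
  | cons e rest ih =>
      simp only [List.length_cons]
      rw [List.range_succ_eq_map, List.map_cons, List.map_map, List.foldl_cons]
      have hfun : ((fun j : Nat => acc ++ (e :: rest).take (j + 1)) ∘ Nat.succ)
          = fun j : Nat => (acc ++ [e]) ++ rest.take (j + 1) := by
        funext j
        simp [List.take_succ_cons]
      rw [hfun]
      simp only [List.take_succ_cons, List.take_zero, pv_pyGet_neg_one]
      simpa using ih (m.insert e (acc ++ [e])) (acc ++ [e])

-- the seeded-then-filled dict of A has exactly pvUniq as keys
theorem pv_keysA (etypes : List PvT) :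
    ((etypes.foldl (fun d e => d.modify (pvNorm e) [] (fun v => v ++ [e]))
        ((pvUniq etypes).foldl (fun d k => d.insert k []) PySem.Dict.empty)).keys)
      = pvUniq etypes := by
  rw [pv_keys_group]
  have hk0 : ((pvUniq etypes).foldl (fun d k => d.insert k ([] : List PvT)) PySem.Dict.empty).keys
      = pvUniq etypes := by
    rw [PySem.Dict.keys_foldl_insert (f := fun _ _ => ([] : List PvT))]
    simp only [PySem.Dict.keys_empty]
    exact (PySem.Set.update_nil_left _).trans
      (PySem.Set.ofList_eq_self_of_nodup _ (pvUniq_nodup etypes))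
  rw [hk0]
  exact pv_update_self _ _ (fun x hx => pvUniq_mem hx)

-- keys of an insert equal Set.add on the keys
theorem pv_keys_insert (d : PySem.Dict PvT (List PvT)) (k : PvT) (v : List PvT) :
    (d.insert k v).keys = PySem.Set.add d.keys k := by
  by_cases h : d.contains k = true
  · rw [PySem.Dict.keys_insert_of_contains d v h, PySem.Set.add, if_pos]
    have := (PySem.Dict.contains_iff_mem_keys d k).1 h
    simpa [PySem.Set.contains] using this
  · rw [PySem.Dict.keys_insert_of_not_contains d v (by simpa using h), PySem.Set.add, if_neg]
    intro hc
    exact h ((PySem.Dict.contains_iff_mem_keys d k).2 (by simpa [PySem.Set.contains] using hc))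

theorem pv_keys_pvF (w : List PvT) (acc : List PvT) (m : PySem.Dict PvT (List PvT)) :
    (pvF w acc m).keys = PySem.Set.update m.keys w := by
  induction w generalizing acc m with
  | nil => rfl
  | cons a rest ih =>
      show (pvF rest (acc ++ [a]) (m.insert a (acc ++ [a]))).keys = _
      rw [ih, pv_keys_insert]
      rfl

-- lookups in pvF: an element of the (sorted) run gets the filter of keys ≤ it
theorem pv_get?_pvF (w : List PvT) (hw : w.Pairwise (fun a b => pvKey a ≤ pvKey b))
    (acc : List PvT) (m : PySem.Dict PvT (List PvT)) (e : PvT) :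
    (pvF w acc m).get? e =
      if e ∈ w then some (acc ++ w.filter (fun x => decide (pvKey x ≤ pvKey e)))
      else m.get? e := by
  induction w generalizing acc m with
  | nil => simp [pvF]
  | cons a rest ih =>
      obtain ⟨ha, hrest⟩ := List.pairwise_cons.1 hw
      have hstep : pvF (a :: rest) acc m = pvF rest (acc ++ [a]) (m.insert a (acc ++ [a])) := rfl
      rw [hstep, ih hrest]
      by_cases he : e ∈ rest
      · have hae : pvKey a ≤ pvKey e := ha e he
        simp only [he, if_true, List.mem_cons, or_true]
        rw [List.filter_cons_of_pos (by simpa using hae)]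
        simp
      · by_cases hea : e = a
        · subst hea
          simp only [he, if_false, List.mem_cons, true_or]
          rw [PySem.Dict.get?_insert_self]
          rw [List.filter_cons_of_pos (by simp)]
          have hnil : rest.filter (fun x => decide (pvKey x ≤ pvKey e)) = [] := by
            refine List.filter_eq_nil_iff.mpr (fun x hx => ?_)
            simp only [decide_eq_true_eq]
            intro hle
            exact he (pvKey_inj (le_antisymm (ha x hx) hle) ▸ hx)
          rw [hnil]
          simp
        · simp only [he, if_false, List.mem_cons, hea, false_or]
          exact PySem.Dict.get?_insert_of_ne _ _ hea

-- Set.update composes along append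
theorem pv_update_append (s : PySem.Set PvT) (xs ys : List PvT) :
    PySem.Set.update s (xs ++ ys) = PySem.Set.update (PySem.Set.update s xs) ys := by
  simp [PySem.Set.update, List.foldl_append]

-- keys of A's fold over a list of group representatives
theorem pv_keys_fold (etypes : List PvT) (cs : List PvT) (m : PySem.Dict PvT (List PvT)) :
    (cs.foldl (fun m c => pvF (pvW etypes c) [] m) m).keys
      = PySem.Set.update m.keys (cs.flatMap (pvW etypes)) := by
  induction cs generalizing m with
  | nil => rfl
  | cons c t ih =>
      rw [List.foldl_cons, ih, pv_keys_pvF, List.flatMap_cons, pv_update_append]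

theorem pv_keys_pvAD (etypes : List PvT) :
    (pvAD etypes).keys = PySem.Set.ofList ((pvUniq etypes).flatMap (pvW etypes)) := by
  unfold pvAD
  rw [pv_keys_fold]
  simp only [PySem.Dict.keys_empty]
  exact PySem.Set.update_nil_left _

-- lookups in A's fold: each key is set during its own group and untouched elsewhere
theorem pv_get?_fold (etypes : List PvT) (cs : List PvT) (m : PySem.Dict PvT (List PvT))
    (e : PvT) :
    (cs.foldl (fun m c => pvF (pvW etypes c) [] m) m).get? e
      = if pvNorm e ∈ cs ∧ e ∈ etypes then some (pvValA etypes e) else m.get? e := by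
  induction cs generalizing m with
  | nil => simp
  | cons c t ih =>
      rw [List.foldl_cons, ih]
      by_cases h1 : pvNorm e ∈ t ∧ e ∈ etypes
      · rw [if_pos h1, if_pos ⟨List.mem_cons_of_mem c h1.1, h1.2⟩]
      · rw [if_neg h1, pv_get?_pvF _ (pvW_pairwise etypes c)]
        by_cases h2 : e ∈ pvW etypes c
        · obtain ⟨hee, hn⟩ := mem_pvW.1 h2
          rw [if_pos h2, if_pos ⟨by rw [hn]; exact List.mem_cons_self, hee⟩]
          unfold pvValA
          rw [hn]
          simp
        · rw [if_neg h2, if_neg]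
          rintro ⟨hc, hee⟩
          rcases List.mem_cons.1 hc with hc | hc
          · exact h2 (mem_pvW.2 ⟨hee, hc⟩)
          · exact h1 ⟨hc, hee⟩

theorem pv_get?_pvAD (etypes : List PvT) (e : PvT) (he : e ∈ etypes) :
    (pvAD etypes).get? e = some (pvValA etypes e) := by
  unfold pvAD
  rw [pv_get?_fold, if_pos ⟨pvUniq_mem (List.mem_map_of_mem he), he⟩]

-- lookups in B's key-to-value insert fold
theorem pv_get?_insfold (etypes : List PvT) (l : List PvT) (m : PySem.Dict PvT (List PvT))
    (e : PvT) :
    (l.foldl (fun m k => m.insert k (pvValB etypes k)) m).get? e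
      = if e ∈ l then some (pvValB etypes e) else m.get? e := by
  induction l generalizing m with
  | nil => simp
  | cons a t ih =>
      rw [List.foldl_cons, ih]
      by_cases he : e ∈ t
      · rw [if_pos he, if_pos (List.mem_cons_of_mem a he)]
      · by_cases hea : e = a
        · subst hea
          rw [if_neg he, if_pos List.mem_cons_self, PySem.Dict.get?_insert_self]
        · rw [if_neg he, if_neg (by simp [hea, he]), PySem.Dict.get?_insert_of_ne _ _ hea]

theorem pv_keysB_nodup (etypes : List PvT) : (pvKeysB etypes).Nodup :=
  ((PySem.List.sorted_perm _ _ _).symm).nodup (PySem.Set.nodup_ofList _)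

theorem pv_keys_pvBD (etypes : List PvT) : (pvBD etypes).keys = pvKeysB etypes := by
  unfold pvBD
  rw [PySem.Dict.keys_foldl_insert (f := fun _ k => pvValB etypes k)]
  simp only [PySem.Dict.keys_empty]
  exact (PySem.Set.update_nil_left _).trans
    (PySem.Set.ofList_eq_self_of_nodup _ (pv_keysB_nodup etypes))

theorem pv_get?_pvBD (etypes : List PvT) (e : PvT) (he : e ∈ pvKeysB etypes) :
    (pvBD etypes).get? e = some (pvValB etypes e) := by
  unfold pvBD
  rw [pv_get?_insfold, if_pos he]

-- Set.ofList is a sublist (the first occurrences, in order)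
theorem pv_foldl_add_sublist (xs : List PvT) : ∀ s : List PvT,
    ∃ t, xs.foldl PySem.Set.add s = s ++ t ∧ t.Sublist xs := by
  induction xs with
  | nil => exact fun s => ⟨[], by simp⟩
  | cons a l ih =>
      intro s
      rw [List.foldl_cons]
      by_cases h : PySem.Set.contains s a = true
      · obtain ⟨t, ht, hs⟩ := ih s
        exact ⟨t, by rwa [PySem.Set.add, if_pos h], hs.cons a⟩
      · obtain ⟨t, ht, hs⟩ := ih (s ++ [a])
        refine ⟨a :: t, ?_, hs.cons₂ a⟩
        rw [PySem.Set.add, if_neg h, ht]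
        simp
theorem pv_ofList_sublist (xs : List PvT) : (PySem.Set.ofList xs).Sublist xs := by
  obtain ⟨t, ht, hs⟩ := pv_foldl_add_sublist xs []
  simpa [PySem.Set.ofList, ht] using hs

-- the flattened group lists are nondecreasing under B's pair key
theorem pv_flat_pairwise (etypes : List PvT) :
    ((pvUniq etypes).flatMap (pvW etypes)).Pairwise (fun a b => pvKey2 a ≤ pvKey2 b) := by
  rw [List.pairwise_flatMap]
  constructor
  · intro c hc
    refine (pvW_pairwise etypes c).imp_of_mem (fun {a b} ha hb hle => ?_)
    have hna : pvNorm a = c := (mem_pvW.1 ha).2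
    have hnb : pvNorm b = c := (mem_pvW.1 hb).2
    unfold pvKey2
    rw [Prod.Lex.toLex_le_toLex]
    exact Or.inr ⟨by rw [hna, hnb], hle⟩
  · refine (pvUniq_pairwise_lt etypes).imp (fun {c₁ c₂} hlt => ?_)
    intro x hx y hy
    unfold pvKey2
    rw [Prod.Lex.toLex_le_toLex]
    exact Or.inl (by rw [(mem_pvW.1 hx).2, (mem_pvW.1 hy).2]; exact hlt)

-- A's key list equals B's key list
theorem pv_keys_eq (etypes : List PvT) :
    pvKeysB etypes = PySem.Set.ofList ((pvUniq etypes).flatMap (pvW etypes)) := by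
  unfold pvKeysB
  refine PySem.List.sorted_eq_of_perm_of_pairwise_lt _ _ _ ?_ ?_
  · rw [List.perm_ext_iff_of_nodup (PySem.Set.nodup_ofList _) (PySem.Set.nodup_ofList _)]
    intro a
    rw [PySem.Set.mem_ofList, PySem.Set.mem_ofList, List.mem_flatMap]
    constructor
    · rintro ⟨c, _, ha⟩
      exact (mem_pvW.1 ha).1
    · intro ha
      exact ⟨pvNorm a, pvUniq_mem (List.mem_map_of_mem ha), mem_pvW.2 ⟨ha, rfl⟩⟩
  · have hle := (List.Pairwise.sublist (pv_ofList_sublist _) (pv_flat_pairwise etypes)).and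
      (PySem.Set.nodup_ofList ((pvUniq etypes).flatMap (pvW etypes)))
    exact hle.imp (fun hab => lt_of_le_of_ne hab.1 (fun hk => hab.2 (pvKey2_inj hk)))

-- the two per-key values agree
theorem pv_val_eq (etypes : List PvT) (k : PvT) : pvValA etypes k = pvValB etypes k := by
  refine PySem.List.eq_of_perm_of_pairwise_le_of_injective pvKey pvKey_inj ?_ ?_ ?_
  · have h1 : List.Perm (pvValA etypes k)
        ((pvGrp etypes (pvNorm k)).filter (fun x => decide (pvKey x ≤ pvKey k))) :=
      (PySem.List.sorted_perm _ _ _).filter _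
    have h2 : List.Perm (pvValB etypes k)
        (etypes.filter (fun x => pvNorm x == pvNorm k && decide (pvKey x ≤ pvKey k))) :=
      PySem.List.sorted_perm _ _ _
    have h3 : etypes.filter (fun x => pvNorm x == pvNorm k && decide (pvKey x ≤ pvKey k))
        = (pvGrp etypes (pvNorm k)).filter (fun x => decide (pvKey x ≤ pvKey k)) := by
      unfold pvGrp
      rw [List.filter_filter]
      exact (List.filter_congr (fun x _ => by rw [Bool.and_comm])).symm
    exact h1.trans (h3 ▸ h2).symm
  · exact (pvW_pairwise etypes (pvNorm k)).filter _
  · exact PySem.List.sorted_pairwise _ _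

-- the two mappings are the same dict
theorem pv_dict_eq (etypes : List PvT) : pvAD etypes = pvBD etypes := by
  have hndA : (pvAD etypes).keys.Nodup := by
    rw [pv_keys_pvAD]; exact PySem.Set.nodup_ofList _
  have hndB : (pvBD etypes).keys.Nodup := by
    rw [pv_keys_pvBD]; exact pv_keysB_nodup etypes
  apply PySem.Dict.ext
  rw [PySem.Dict.items_eq_map_keys _ hndA ([] : List PvT),
      PySem.Dict.items_eq_map_keys _ hndB ([] : List PvT),
      pv_keys_pvAD, pv_keys_pvBD, pv_keys_eq]
  refine List.map_congr_left (fun k hk => ?_)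
  have hkB : k ∈ pvKeysB etypes := by rw [pv_keys_eq]; exact hk
  have hke : k ∈ etypes := by
    have := hkB
    unfold pvKeysB at this
    rw [PySem.List.mem_sorted, PySem.Set.mem_ofList] at this
    exact this
  rw [PySem.Dict.getD_eq_get?_getD, PySem.Dict.getD_eq_get?_getD,
      pv_get?_pvAD etypes k hke, pv_get?_pvBD etypes k hkB, pv_val_eq]

-- ===== VERDICT (by name: the statement is the Claim_ definition above) =====
theorem get_temporal_ordered_etypes_spec : Claim_equal_get_temporal_ordered_etypes := by
  intro etypes _
  unfold Spec_get_temporal_ordered_etypes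
  unfold get_temporal_ordered_etypes get_temporal_ordered_etypes_alt get_unique_etype_triplet
  simp only []
  rw [← pvUniq_def]
  -- A's grouped dict: keys = pvUniq, values = the input filters
  have hfilA : ∀ c, (etypes.foldl (fun d e => d.modify (pvNorm e) [] (fun v => v ++ [e]))
      ((pvUniq etypes).foldl (fun d k => d.insert k []) PySem.Dict.empty)).getD c []
        = pvGrp etypes c := by
    intro c
    rw [pv_getD_group, pv_getD_seed _ _ (fun c => by simp) c, List.nil_append]
    rfl
  have hnd : ((etypes.foldl (fun d e => d.modify (pvNorm e) [] (fun v => v ++ [e]))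
      ((pvUniq etypes).foldl (fun d k => d.insert k []) PySem.Dict.empty)).keys).Nodup := by
    rw [pv_keysA]
    exact pvUniq_nodup etypes
  rw [PySem.Dict.items_eq_map_keys _ hnd ([] : List PvT), pv_keysA etypes, List.foldl_map]
  -- A's mapping fold is pvAD, B's is pvBD; they are equal
  have hA : (pvUniq etypes).foldl (fun m k =>
      let v := PySem.List.sorted ((etypes.foldl
          (fun d e => d.modify (pvNorm e) [] (fun v => v ++ [e]))
          ((pvUniq etypes).foldl (fun d k => d.insert k []) PySem.Dict.empty)).getD k []) pvKey
      let ps := (PySem.List.pyRange 1 ((v.length : Int) + 1)).map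
        (fun i => PySem.List.slice v none (some i))
      ps.foldl (fun m p => m.insert ((PySem.List.pyGet? p (-1)).getD ("", "", "")) p) m)
      (PySem.Dict.empty : PySem.Dict PvT (List PvT)) = pvAD etypes := by
    unfold pvAD
    refine PySem.List.foldl_congr_mem _ _ _ _ (fun m k _ => ?_)
    simp only [hfilA]
    unfold pvF pvW
    rw [pv_slices, ← pv_inner _ m []]
    simp
  rw [hA, pv_dict_eq]
  rfl
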